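-- pv_equiv track=rewrite | github.com/pohaoc2/he-feature-visualizer | patchify.py | get_patch_grid
-- ===== SOURCE A (Python) =====
-- def get_patch_grid(img_w: int, img_h: int, patch_size: int, stride: int) -> list[tuple[int, int]]:
--     """Return list of (i, j) patch indices that are fully within the image.
--
--     Patch top-left pixel coordinates: x0 = j * stride, y0 = i * stride.
--     Only patches satisfying x0 + patch_size <= img_w and
--     y0 + patch_size <= img_h are included.
--     """
--     coords = []
--     i = 0
--     while True:
--         y0 = i * stride
--         if y0 + patch_size > img_h:
--             break
--         j = 0
--         while True:
--             x0 = j * stride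
--             if x0 + patch_size > img_w:
--                 break
--             coords.append((i, j))
--             j += 1
--         i += 1
--     return coords
-- ===== SOURCE B (Python) =====
-- def get_patch_grid(img_w: int, img_h: int, patch_size: int, stride: int) -> list[tuple[int, int]]:
--     """Flat enumeration: count rows/cols arithmetically, then decode a single
--     linear index k into (i, j) = divmod(k, n_j). No nested loops."""
--     n_i = max(0, (img_h - patch_size) // stride + 1)
--     n_j = max(0, (img_w - patch_size) // stride + 1)
--     return [divmod(k, n_j) for k in range(n_i * n_j)]
-- ===== Notes on version B (the rewrite author's own statement) =====
-- stated objective: alternative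
-- what changed: Replaced the two break-on-condition while loops by a single flat loop over n_i*n_j linear indices (counts computed in closed form) decoded into (i, j) with divmod.
-- outside the precondition, e.g. on get_patch_grid(1, 0, 1, 0): A returns [], B raises ZeroDivisionError; on get_patch_grid(1, 0, 2, -1): A returns [], B returns [(0, 0), (0, 1), (1, 0), (1, 1), (2, 0), (2, 1)]
import Mathlib
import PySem

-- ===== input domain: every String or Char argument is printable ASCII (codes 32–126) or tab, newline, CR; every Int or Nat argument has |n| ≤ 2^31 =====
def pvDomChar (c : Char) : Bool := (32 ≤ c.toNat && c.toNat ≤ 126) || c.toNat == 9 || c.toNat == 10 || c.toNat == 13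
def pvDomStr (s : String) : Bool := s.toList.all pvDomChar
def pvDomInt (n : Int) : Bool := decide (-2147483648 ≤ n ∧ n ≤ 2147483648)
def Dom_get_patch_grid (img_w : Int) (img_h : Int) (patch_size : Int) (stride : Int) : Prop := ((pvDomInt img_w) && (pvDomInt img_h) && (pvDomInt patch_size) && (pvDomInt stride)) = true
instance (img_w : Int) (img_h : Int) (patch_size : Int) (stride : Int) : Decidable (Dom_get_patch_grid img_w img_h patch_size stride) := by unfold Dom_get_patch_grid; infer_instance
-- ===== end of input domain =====

-- B replaces A's nested break-on-condition while loops by ONE flat loop over n_i*n_j linear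
-- indices (counts in closed form) decoded with divmod (alternative); equivalence is claimed
-- for stride ≥ 1 (Pre_).

-- ===== PORT A =====
-- inner while loop of A; the Nat fuel only makes the recursion total, it is chosen large
-- enough that A's break is always what stops the loop on Pre_ inputs
def gpgInner (img_w : Int) (patch_size : Int) (stride : Int) (i : Int) : Nat → Int → List (Int × Int)
  | 0, _ => []
  | fuel + 1, j =>
    if img_w < j * stride + patch_size then []
    else (i, j) :: gpgInner img_w patch_size stride i fuel (j + 1)

-- outer while loop of A
def gpgOuter (img_w : Int) (img_h : Int) (patch_size : Int) (stride : Int) : Nat → Int → List (Int × Int)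
  | 0, _ => []
  | fuel + 1, i =>
    if img_h < i * stride + patch_size then []
    else gpgInner img_w patch_size stride i ((img_w - patch_size).toNat + 2) 0
         ++ gpgOuter img_w img_h patch_size stride fuel (i + 1)

def get_patch_grid (img_w : Int) (img_h : Int) (patch_size : Int) (stride : Int) : List (Int × Int) :=
  gpgOuter img_w img_h patch_size stride ((img_h - patch_size).toNat + 2) 0

-- ===== PORT B =====
-- divmod(k, n_j) is ported as (floordiv k n_j, mod k n_j); exact wherever it is evaluated,
-- since the range is nonempty only when n_j ≠ 0 (Python's divmod never raises here)
def get_patch_grid_alt (img_w : Int) (img_h : Int) (patch_size : Int) (stride : Int) : List (Int × Int) :=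
  let n_i := max 0 (PySem.Int.floordiv (img_h - patch_size) stride + 1)
  let n_j := max 0 (PySem.Int.floordiv (img_w - patch_size) stride + 1)
  (PySem.List.pyRange 0 (n_i * n_j) 1).map
    (fun k => (PySem.Int.floordiv k n_j, PySem.Int.mod k n_j))

-- ===== PRECONDITION & SPEC =====
-- Pre_ excludes stride ≤ 0: there A either loops forever (when patch_size ≤ img_h) or
-- returns [] by accident of its break order, while B's integer division raises (stride = 0)
-- or yields a different grid (negative stride).
def Pre_get_patch_grid (img_w : Int) (img_h : Int) (patch_size : Int) (stride : Int) : Prop :=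
  1 ≤ stride
instance (img_w : Int) (img_h : Int) (patch_size : Int) (stride : Int) : Decidable (Pre_get_patch_grid img_w img_h patch_size stride) := by unfold Pre_get_patch_grid; infer_instance

def pvWitness_get_patch_grid : Int × Int × Int × Int := (10, 10, 3, 2)

def Spec_get_patch_grid (img_w : Int) (img_h : Int) (patch_size : Int) (stride : Int) (out : List (Int × Int)) : Prop := out = get_patch_grid_alt img_w img_h patch_size stride
instance (img_w : Int) (img_h : Int) (patch_size : Int) (stride : Int) (out : List (Int × Int)) : Decidable (Spec_get_patch_grid img_w img_h patch_size stride out) := by unfold Spec_get_patch_grid; infer_instance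

-- ===== CLAIM (what is proved, stated in full; the proofs are below) =====
def Claim_equal_get_patch_grid : Prop := ∀ (img_w : Int) (img_h : Int) (patch_size : Int) (stride : Int), Dom_get_patch_grid img_w img_h patch_size stride → Pre_get_patch_grid img_w img_h patch_size stride → Spec_get_patch_grid img_w img_h patch_size stride (get_patch_grid img_w img_h patch_size stride)

-- ===== LEMMAS AND PROOFS =====

-- A's break test equals "index past the closed-form count"
theorem gpg_break_iff (w p s j : Int) (hs : 1 ≤ s) (hj : 0 ≤ j) :
    (w < j * s + p) ↔ max 0 (PySem.Int.floordiv (w - p) s + 1) ≤ j := by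
  have h : j ≤ PySem.Int.floordiv (w - p) s ↔ j * s ≤ w - p :=
    PySem.Int.le_floordiv_iff_mul_le (by omega)
  generalize j * s = m at h ⊢
  generalize PySem.Int.floordiv (w - p) s = q at h ⊢
  omega

theorem floordiv_le_max (a s : Int) (hs : 1 ≤ s) :
    PySem.Int.floordiv a s ≤ max 0 a := by
  have h : PySem.Int.floordiv a s * s ≤ a :=
    (PySem.Int.le_floordiv_iff_mul_le (by omega)).mp le_rfl
  rcases le_or_gt (PySem.Int.floordiv a s) 0 with h0 | h0
  · omega
  · have h1 : PySem.Int.floordiv a s * 1 ≤ PySem.Int.floordiv a s * s :=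
      mul_le_mul_of_nonneg_left hs (by omega)
    rw [mul_one] at h1
    omega

theorem gpgInner_eq (w p s i : Int) (hs : 1 ≤ s) :
    ∀ (fuel : Nat) (j : Int), 0 ≤ j →
      (max 0 (PySem.Int.floordiv (w - p) s + 1) - j).toNat < fuel →
      gpgInner w p s i fuel j =
        (PySem.List.pyRange j (max 0 (PySem.Int.floordiv (w - p) s + 1)) 1).map
          (fun j => (i, j)) := by
  intro fuel
  induction fuel with
  | zero => intro j hj hf; omega
  | succ fuel ih =>
    intro j hj hf
    by_cases hb : w < j * s + p
    · have hend : max 0 (PySem.Int.floordiv (w - p) s + 1) ≤ j :=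
        (gpg_break_iff w p s j hs hj).mp hb
      rw [gpgInner, if_pos hb, PySem.List.pyRange_one_eq_nil hend]
      simp
    · have hlt : j < max 0 (PySem.Int.floordiv (w - p) s + 1) := by
        have := (gpg_break_iff w p s j hs hj).mpr
        by_contra hc
        exact hb (this (by omega))
      rw [gpgInner, if_neg hb, PySem.List.pyRange_one_cons hlt]
      rw [ih (j + 1) (by omega) (by omega)]
      simp

theorem gpgOuter_eq (w h p s : Int) (hs : 1 ≤ s) :
    ∀ (fuel : Nat) (i : Int), 0 ≤ i →
      (max 0 (PySem.Int.floordiv (h - p) s + 1) - i).toNat < fuel →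
      gpgOuter w h p s fuel i =
        (PySem.List.pyRange i (max 0 (PySem.Int.floordiv (h - p) s + 1)) 1).flatMap
          (fun i => (PySem.List.pyRange 0 (max 0 (PySem.Int.floordiv (w - p) s + 1)) 1).map
            (fun j => (i, j))) := by
  intro fuel
  induction fuel with
  | zero => intro i hi hf; omega
  | succ fuel ih =>
    intro i hi hf
    by_cases hb : h < i * s + p
    · have hend : max 0 (PySem.Int.floordiv (h - p) s + 1) ≤ i :=
        (gpg_break_iff h p s i hs hi).mp hb
      rw [gpgOuter, if_pos hb, PySem.List.pyRange_one_eq_nil hend]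
      simp
    · have hlt : i < max 0 (PySem.Int.floordiv (h - p) s + 1) := by
        have := (gpg_break_iff h p s i hs hi).mpr
        by_contra hc
        exact hb (this (by omega))
      have hinner : gpgInner w p s i ((w - p).toNat + 2) 0 =
          (PySem.List.pyRange 0 (max 0 (PySem.Int.floordiv (w - p) s + 1)) 1).map
            (fun j => (i, j)) := by
        apply gpgInner_eq w p s i hs _ 0 le_rfl
        have := floordiv_le_max (w - p) s hs
        omega
      rw [gpgOuter, if_neg hb, PySem.List.pyRange_one_cons hlt, List.flatMap_cons,
        hinner, ih (i + 1) (by omega) (by omega)]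

-- one row of the flat enumeration: the segment [a*b, a*b+b) decodes to row a
theorem divmod_segment (a b : Int) (hb : 0 ≤ b) :
    (PySem.List.pyRange (a * b) (a * b + b) 1).map
      (fun k => (PySem.Int.floordiv k b, PySem.Int.mod k b)) =
    (PySem.List.pyRange 0 b 1).map (fun j => (a, j)) := by
  rcases eq_or_lt_of_le hb with hb0 | hbpos
  · rw [PySem.List.pyRange_one_eq_nil (by omega), PySem.List.pyRange_one_eq_nil (by omega)]
    simp
  · apply List.ext_getElem
    · simp [PySem.List.length_pyRange_one]
    · intro t h1 h2
      simp only [List.getElem_map, PySem.List.getElem_pyRange_one]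
      have ht : (t : Int) < b := by
        have := h1
        simp [PySem.List.length_pyRange_one] at this
        omega
      have hd : PySem.Int.floordiv (a * b + t) b = a :=
        (PySem.Int.floordiv_eq_iff_of_pos hbpos).mpr (by constructor <;> nlinarith)
      have hm : PySem.Int.mod (a * b + t) b = (t : Int) := by
        have := PySem.Int.floordiv_mul_add_mod (a * b + t) b
        rw [hd] at this
        omega
      rw [hd, hm]
      simp

-- the whole flat enumeration equals the nested grid
theorem divmod_grid (b : Int) (hb : 0 ≤ b) :
    ∀ (n : Nat),
      (PySem.List.pyRange 0 ((n : Int) * b) 1).map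
        (fun k => (PySem.Int.floordiv k b, PySem.Int.mod k b)) =
      (PySem.List.pyRange 0 (n : Int) 1).flatMap
        (fun i => (PySem.List.pyRange 0 b 1).map (fun j => (i, j))) := by
  intro n
  induction n with
  | zero => simp [PySem.List.pyRange_one_eq_nil]
  | succ n ih =>
    have hcast : ((n + 1 : Nat) : Int) = (n : Int) + 1 := by push_cast; ring
    have hsplit : PySem.List.pyRange 0 (((n : Int) + 1) * b) 1 =
        PySem.List.pyRange 0 ((n : Int) * b) 1
          ++ PySem.List.pyRange ((n : Int) * b) ((n : Int) * b + b) 1 := by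
      have := PySem.List.pyRange_one_append 0 ((n : Int) * b) ((n : Int) * b + b)
        (by positivity) (by omega)
      rw [show ((n : Int) + 1) * b = (n : Int) * b + b by ring]
      exact this
    rw [hcast, hsplit, List.map_append, ih,
      PySem.List.pyRange_one_succ_right (by positivity), List.flatMap_append,
      divmod_segment (n : Int) b hb]
    simp

-- ===== VERDICT (by name: the statement is the Claim_ definition above) =====
theorem get_patch_grid_spec : Claim_equal_get_patch_grid := by
  intro w h p s _ hs
  unfold Spec_get_patch_grid get_patch_grid get_patch_grid_alt
  rw [gpgOuter_eq w h p s hs _ 0 le_rfl]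
  · set ni := max 0 (PySem.Int.floordiv (h - p) s + 1) with hni
    set nj := max 0 (PySem.Int.floordiv (w - p) s + 1) with hnj
    have hni0 : 0 ≤ ni := by omega
    have hnj0 : 0 ≤ nj := by omega
    have hn : ni = ((ni.toNat : Nat) : Int) := by omega
    rw [hn, divmod_grid nj hnj0 ni.toNat]
  · have := floordiv_le_max (h - p) s hs
    omega
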